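-- pv_equiv track=rewrite | github.com/vduseev/number-encoding | phone_numbers_encoder/encoding_scheme_builder/encoding_scheme_builder.py | map_words_to_numbers
-- ===== SOURCE A (Python) =====
-- def remove_characters(string, chars):
--     result = string
--     for char in chars:
--         result = result.replace(char, '')
--     return result
--
-- def map_words_to_numbers(words, char_to_digit_mapping, ignored_dict_chars):
--     """Build a dict with encodings as keys and list of words having such
--     encoding as values.
--
--     Key     - is a string of digits encoded according to mapping dict.
--     Value   - is a set of all words from encoding_scheme_builder file that
--               are encoded by such string.
--
--     :param words: list of all words from encoding_scheme_builder file
--     :param char_to_digit_mapping: dict of character to digit mapping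
--     :param ignored_dict_chars: list of characters to ignore when encoding words
--     :return: dict of numbers with sets of words encoded by them as values
--     """
--
--     # Encoded mapping with encoding as a key and a list of associated
--     # words as a value.
--     mapping = {}
--
--     # For each word calculate the encoded value
--     for word in words:
--         word_encoding = encode_word_using_mapping(
--             word=word,
--             mapping=char_to_digit_mapping,
--             ignored_dict_chars=ignored_dict_chars
--         )
--
--         # Check if some word already produced same encoding.
--         if word_encoding in mapping:
--             # If yes, add the current word as an additional encoding option.
--             mapping[word_encoding].add(word)
--         else:
--             # If no, add a new key with the current word as the first list
--             # value.
--             mapping[word_encoding] = {word}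
--
--     return mapping
--
-- def encode_word_using_mapping(word, mapping, ignored_dict_chars):
--     """Represent given word as a string of digits according to the mapping
--     given in the requirements.
--
--     The words in the encoding_scheme_builder contain letters
--     (capital or small, but the difference is ignored in the sorting), dashes
--     - and double quotes " . For the encoding only the letters are used.
--
--     :param word: word that needs to be converted to digit string
--     :param mapping: dict of character to digit mapping
--     :param ignored_dict_chars: list of characters to ignore when encoding words
--     :return: string of digits representing given word
--     """
--
--     # remove umlaut symbol (represented by double quotes) and dashes
--     clean_word = remove_characters(word, ignored_dict_chars)
--
--     encoding = ''
--     for char in clean_word: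
--         encoding += mapping[char]
--
--     return encoding
-- ===== SOURCE B (Python) =====
-- def remove_characters(string, chars):
--     result = string
--     for char in chars:
--         result = result.replace(char, '')
--     return result
--
--
-- def encode_word_using_mapping(word, mapping, ignored_dict_chars):
--     clean_word = remove_characters(word, ignored_dict_chars)
--     encoding = ''
--     for char in clean_word:
--         encoding += mapping[char]
--     return encoding
--
--
-- def map_words_to_numbers(words, char_to_digit_mapping, ignored_dict_chars):
--     """Two-phase grouping: encode every word once into (encoding, word) pairs,
--     take the distinct encodings in first-occurrence order, then build each
--     group as the set of words whose encoding matches that key."""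
--     encoded = [(encode_word_using_mapping(w, char_to_digit_mapping, ignored_dict_chars), w)
--                for w in words]
--     return {key: {w for e, w in encoded if e == key}
--             for key in dict.fromkeys(e for e, _ in encoded)}
-- ===== Notes on version B (the rewrite author's own statement) =====
-- stated objective: alternative
-- what changed: Replaces the single-pass dict insert-or-create loop with a two-phase pipeline: encode all words once into (encoding, word) pairs, dedup the encodings in first-occurrence order with dict.fromkeys, then build each group as a set comprehension filtering the pair list per key.
import Mathlib
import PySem

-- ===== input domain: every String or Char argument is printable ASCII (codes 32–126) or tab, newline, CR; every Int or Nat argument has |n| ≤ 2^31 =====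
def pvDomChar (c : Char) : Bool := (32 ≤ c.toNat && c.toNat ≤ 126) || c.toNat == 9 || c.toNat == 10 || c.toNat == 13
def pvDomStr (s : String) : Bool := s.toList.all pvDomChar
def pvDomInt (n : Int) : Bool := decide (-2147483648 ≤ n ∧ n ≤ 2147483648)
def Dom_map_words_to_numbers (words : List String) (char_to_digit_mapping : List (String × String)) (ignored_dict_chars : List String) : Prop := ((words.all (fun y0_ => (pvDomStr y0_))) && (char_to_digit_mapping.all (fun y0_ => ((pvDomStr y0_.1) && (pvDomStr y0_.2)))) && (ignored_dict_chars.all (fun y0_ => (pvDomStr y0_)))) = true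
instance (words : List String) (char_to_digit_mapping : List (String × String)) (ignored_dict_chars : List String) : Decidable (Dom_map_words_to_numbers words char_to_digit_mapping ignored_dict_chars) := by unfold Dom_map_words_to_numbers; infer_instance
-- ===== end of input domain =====

-- B replaces A's single-pass dict insert-or-create loop by a two-phase pipeline
-- (encode all words into pairs, dedup encodings in first-occurrence order, build
-- each group by filtering the pair list); same return value, similar cost.


-- ===== PORT A =====
def remove_characters (string : String) (chars : List String) : String :=
  chars.foldl (fun result char => PySem.Str.replace result char "") string

-- encode_word_using_mapping: 'mapping[char]' raises KeyError on a missing key,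
-- so the port returns none exactly there (the encoding is accumulated as List Char).
def encode_word_using_mapping (word : String) (mapping : PySem.Dict String String) (ignored_dict_chars : List String) : Option String :=
  let clean_word := remove_characters word ignored_dict_chars
  (clean_word.toList.foldl
    (fun (acc : Option (List Char)) c =>
      acc.bind (fun e => (mapping.get? (String.singleton c)).map (fun d => e ++ d.toList)))
    (some [])).map String.ofList

def map_words_to_numbers (words : List String) (char_to_digit_mapping : List (String × String)) (ignored_dict_chars : List String) : List (String × List String) :=
  let md := PySem.Dict.ofList char_to_digit_mapping
  match words.foldl
      (fun (acc : Option (PySem.Dict String (PySem.Set String))) word =>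
        acc.bind fun mapping =>
          (encode_word_using_mapping word md ignored_dict_chars).map fun word_encoding =>
            match mapping.get? word_encoding with
            | some s => mapping.insert word_encoding (PySem.Set.add s word)
            | none   => mapping.insert word_encoding (PySem.Set.ofList [word]))
      (some PySem.Dict.empty) with
  | some mapping => mapping.items
  | none => []   -- a KeyError in Python; excluded by Pre_

-- ===== PORT B =====
def map_words_to_numbers_alt (words : List String) (char_to_digit_mapping : List (String × String)) (ignored_dict_chars : List String) : List (String × List String) :=
  let md := PySem.Dict.ofList char_to_digit_mapping
  match words.mapM (fun w => (encode_word_using_mapping w md ignored_dict_chars).map (fun e => (e, w))) with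
  | none => []   -- a KeyError in Python; excluded by Pre_
  | some encoded =>
    (PySem.List.dedup (encoded.map Prod.fst)).map
      (fun key => (key, PySem.Set.ofList ((encoded.filter (fun p => p.1 == key)).map Prod.snd)))

-- ===== PRECONDITION & SPEC =====
-- A raises KeyError when a character of a cleaned word is not a key of the mapping;
-- Pre_ admits exactly the inputs where every such character is a key (A returns).
def Pre_map_words_to_numbers (words : List String) (char_to_digit_mapping : List (String × String)) (ignored_dict_chars : List String) : Prop :=
  (words.all (fun w => (remove_characters w ignored_dict_chars).toList.all
    (fun c => (PySem.Dict.ofList char_to_digit_mapping).contains (String.singleton c)))) = true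
instance (words : List String) (char_to_digit_mapping : List (String × String)) (ignored_dict_chars : List String) : Decidable (Pre_map_words_to_numbers words char_to_digit_mapping ignored_dict_chars) := by unfold Pre_map_words_to_numbers; infer_instance

def pvWitness_map_words_to_numbers : List String × (List (String × String)) × List String :=
  (["ab", "ba", "a-b", "b"], [("a", "2"), ("b", "2")], ["-"])

def Spec_map_words_to_numbers (words : List String) (char_to_digit_mapping : List (String × String)) (ignored_dict_chars : List String) (out : List (String × List String)) : Prop := out = map_words_to_numbers_alt words char_to_digit_mapping ignored_dict_chars
instance (words : List String) (char_to_digit_mapping : List (String × String)) (ignored_dict_chars : List String) (out : List (String × List String)) : Decidable (Spec_map_words_to_numbers words char_to_digit_mapping ignored_dict_chars out) := by unfold Spec_map_words_to_numbers; infer_instance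

-- ===== CLAIM (what is proved, stated in full; the proofs are below) =====
def Claim_equal_map_words_to_numbers : Prop := ∀ (words : List String) (char_to_digit_mapping : List (String × String)) (ignored_dict_chars : List String), Dom_map_words_to_numbers words char_to_digit_mapping ignored_dict_chars → Pre_map_words_to_numbers words char_to_digit_mapping ignored_dict_chars → Spec_map_words_to_numbers words char_to_digit_mapping ignored_dict_chars (map_words_to_numbers words char_to_digit_mapping ignored_dict_chars)

-- ===== LEMMAS AND PROOFS =====

def pvEnc (md : PySem.Dict String String) (ign : List String) (w : String) : String :=
  (encode_word_using_mapping w md ign).getD ""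

theorem pvFold_isSome (md : PySem.Dict String String) (cs : List Char)
    (h : ∀ c ∈ cs, md.contains (String.singleton c) = true) (e : List Char) :
    (cs.foldl
      (fun (acc : Option (List Char)) c =>
        acc.bind (fun e => (md.get? (String.singleton c)).map (fun d => e ++ d.toList)))
      (some e)).isSome := by
  induction cs generalizing e with
  | nil => simp
  | cons c cs ih =>
    have hc := h c (List.mem_cons_self ..)
    rw [PySem.Dict.contains_eq_isSome_get?] at hc
    obtain ⟨d, hd⟩ := Option.isSome_iff_exists.mp hc
    simp only [List.foldl_cons, Option.bind_some, hd, Option.map_some]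
    exact ih (fun c hc => h c (List.mem_cons_of_mem _ hc)) _

theorem encode_eq_some (md : PySem.Dict String String) (ign : List String) (w : String)
    (h : ∀ c ∈ (remove_characters w ign).toList, md.contains (String.singleton c) = true) :
    encode_word_using_mapping w md ign = some (pvEnc md ign w) := by
  unfold pvEnc encode_word_using_mapping
  have := pvFold_isSome md (remove_characters w ign).toList h []
  obtain ⟨v, hv⟩ := Option.isSome_iff_exists.mp this
  simp only [hv, Option.map_some, Option.getD_some]


theorem foldl_opt_eq (md : PySem.Dict String String) (ign : List String)
    (ws : List String) (d : PySem.Dict String (PySem.Set String))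
    (h : ∀ w ∈ ws, encode_word_using_mapping w md ign = some (pvEnc md ign w)) :
    ws.foldl
      (fun (acc : Option (PySem.Dict String (PySem.Set String))) word =>
        acc.bind fun mapping =>
          (encode_word_using_mapping word md ign).map fun e =>
            match mapping.get? e with
            | some s => mapping.insert e (PySem.Set.add s word)
            | none   => mapping.insert e (PySem.Set.ofList [word]))
      (some d)
    = some (ws.foldl
        (fun (mapping : PySem.Dict String (PySem.Set String)) word =>
          match mapping.get? (pvEnc md ign word) with
          | some s => mapping.insert (pvEnc md ign word) (PySem.Set.add s word)
          | none   => mapping.insert (pvEnc md ign word) (PySem.Set.ofList [word])) d) := by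
  induction ws generalizing d with
  | nil => simp
  | cons w ws ih =>
    simp only [List.foldl_cons, Option.bind_some, h w (List.mem_cons_self ..), Option.map_some]
    exact ih _ (fun w hw => h w (List.mem_cons_of_mem _ hw))

theorem mapM_eq_some (md : PySem.Dict String String) (ign : List String) (ws : List String)
    (h : ∀ w ∈ ws, encode_word_using_mapping w md ign = some (pvEnc md ign w)) :
    ws.mapM (fun w => (encode_word_using_mapping w md ign).map (fun e => (e, w)))
      = some (ws.map (fun w => (pvEnc md ign w, w))) := by
  induction ws with
  | nil => simp
  | cons w ws ih =>
    rw [List.mapM_cons]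
    simp only [h w (List.mem_cons_self ..), Option.map_some,
      ih (fun w hw => h w (List.mem_cons_of_mem _ hw))]
    rfl


theorem fold_items (E : String → String) (ws : List String) :
    (ws.foldl
        (fun (mapping : PySem.Dict String (PySem.Set String)) word =>
          match mapping.get? (E word) with
          | some s => mapping.insert (E word) (PySem.Set.add s word)
          | none   => mapping.insert (E word) (PySem.Set.ofList [word])) PySem.Dict.empty).items
    = (PySem.Set.ofList (ws.map E)).map
        (fun key => (key, PySem.Set.ofList (ws.filter (fun w => E w == key)))) := by
  induction ws using List.reverseRecOn with
  | nil => rfl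
  | append_singleton ws w ih =>
    rw [List.foldl_append, List.foldl_cons, List.foldl_nil]
    set F : PySem.Dict String (PySem.Set String) → String → PySem.Dict String (PySem.Set String) := fun (mapping : PySem.Dict String (PySem.Set String)) word =>
          match mapping.get? (E word) with
          | some s => mapping.insert (E word) (PySem.Set.add s word)
          | none   => mapping.insert (E word) (PySem.Set.ofList [word]) with hF
    set D := ws.foldl F PySem.Dict.empty with hD
    have hkeys : D.keys = PySem.Set.ofList (ws.map E) := by
      show D.items.map Prod.fst = _
      rw [ih, List.map_map]
      simp [Function.comp_def]
    have hnd : D.keys.Nodup := by rw [hkeys]; exact PySem.Set.nodup_ofList _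
    rw [List.map_append, List.map_singleton, PySem.Set.ofList_append_singleton]
    by_cases hmem : E w ∈ PySem.Set.ofList (ws.map E)
    · -- existing key
      have hget : D.get? (E w) = some (PySem.Set.ofList (ws.filter (fun x => E x == E w))) := by
        apply PySem.Dict.get?_of_mem_items _ _ hnd
        rw [ih]
        exact List.mem_map_of_mem hmem
      simp only [hget]
      rw [PySem.Dict.items_insert_of_contains _ _
        (by rw [PySem.Dict.contains_iff_mem_keys, hkeys]; exact hmem)]
      rw [ih, List.map_map, PySem.Set.add_of_mem hmem]
      apply List.map_congr_left
      intro k hk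
      by_cases hke : k = E w
      · subst hke
        simp only [Function.comp_apply, beq_self_eq_true, if_pos]
        rw [List.filter_append]
        simp only [List.filter_cons, beq_self_eq_true, if_pos, List.filter_nil]
        rw [PySem.Set.ofList_append_singleton]
      · have : (k == E w) = false := by simp [hke]
        simp only [Function.comp_apply, this, if_neg, Bool.false_eq_true, not_false_iff]
        rw [List.filter_append]
        have hf : (E w == k) = false := by simp [Ne.symm hke]
        simp [hf]
    · -- new key
      have hget : D.get? (E w) = none := by
        rw [PySem.Dict.get?_eq_none_iff_not_mem_keys, hkeys]; exact hmem
      simp only [hget]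
      have hcf : D.contains (E w) = false := by
        rw [Bool.eq_false_iff]
        intro hc
        exact hmem (by rw [← hkeys, ← PySem.Dict.contains_iff_mem_keys]; exact hc)
      rw [PySem.Dict.items_insert, if_neg (by simp [hcf])]
      rw [PySem.Set.add_of_not_mem hmem, List.map_append, List.map_singleton, ih]
      congr 1
      · apply List.map_congr_left
        intro k hk
        have hke : E w ≠ k := fun h => hmem (h ▸ hk)
        rw [List.filter_append]
        have hf : (E w == k) = false := by simp [hke]
        simp [hf]
      · -- the new singleton entry
        have hfil : ws.filter (fun x => E x == E w) = [] := by
          rw [List.filter_eq_nil_iff]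
          intro x hx hbe
          exact hmem (by rw [PySem.Set.mem_ofList]; exact (beq_iff_eq.mp hbe) ▸ List.mem_map_of_mem hx)
        rw [List.filter_append, hfil]
        simp [PySem.Set.ofList]

-- ===== VERDICT (by name: the statement is the Claim_ definition above) =====
theorem map_words_to_numbers_spec : Claim_equal_map_words_to_numbers := by
  intro words ctd ign _ hpre
  unfold Spec_map_words_to_numbers
  simp only [Pre_map_words_to_numbers, List.all_eq_true] at hpre
  have henc : ∀ w ∈ words,
      encode_word_using_mapping w (PySem.Dict.ofList ctd) ign
        = some (pvEnc (PySem.Dict.ofList ctd) ign w) :=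
    fun w hw => encode_eq_some _ _ _ (hpre w hw)
  simp only [map_words_to_numbers, map_words_to_numbers_alt]
  rw [foldl_opt_eq _ _ _ _ henc, mapM_eq_some _ _ _ henc]
  simp only [fold_items (pvEnc (PySem.Dict.ofList ctd) ign) words]
  simp [List.filter_map, List.map_map, Function.comp_def]
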